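-- pv_equiv track=rewrite | github.com/DPNT-Sourcecode/CHK-vetq01 | lib/solutions/CHK/checkout_solution.py | get_greedy_combinations_of_deal
-- ===== SOURCE A (Python) =====
-- def get_greedy_combinations_of_deal(list_of_products):
--     total_cost = 0
--     triplets = 0
--     for i in range(0, len(list_of_products), 3):
--         product_tuples = list_of_products[i: i+3]
--         if len(product_tuples) == 3:
--             for product_tuple in product_tuples:
--                 total_cost += product_tuple[0]
--             triplets += 1
--     return total_cost,triplets
-- ===== SOURCE B (Python) =====
-- def get_greedy_combinations_of_deal(list_of_products):
--     triplets = len(list_of_products) // 3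
--     total_cost = sum(p[0] for p in list_of_products[:3 * triplets])
--     return total_cost, triplets
-- ===== Notes on version B (the rewrite author's own statement) =====
-- stated objective: simpler
-- what changed: Replaces the chunk-by-3 outer loop with its per-chunk length-3 guard and nested inner accumulation loop by a closed-form triplet count len//3 and one flat sum of first elements over the prefix covered by complete triplets.
import Mathlib
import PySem

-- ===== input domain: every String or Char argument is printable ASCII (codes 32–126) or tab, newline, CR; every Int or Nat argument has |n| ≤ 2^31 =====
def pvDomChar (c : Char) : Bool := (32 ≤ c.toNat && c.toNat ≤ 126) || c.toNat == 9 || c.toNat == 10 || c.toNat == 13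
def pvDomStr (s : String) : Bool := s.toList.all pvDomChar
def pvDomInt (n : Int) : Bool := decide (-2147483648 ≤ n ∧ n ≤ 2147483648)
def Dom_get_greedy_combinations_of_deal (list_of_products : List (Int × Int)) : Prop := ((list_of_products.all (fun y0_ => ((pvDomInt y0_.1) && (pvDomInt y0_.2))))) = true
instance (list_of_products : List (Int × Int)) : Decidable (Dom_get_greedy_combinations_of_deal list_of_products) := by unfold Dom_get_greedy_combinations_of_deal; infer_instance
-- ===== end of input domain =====

-- B replaces A's chunk-by-3 loop (with its length-3 guard and nested inner loop) by the
-- closed-form triplet count len // 3 and one flat sum over the complete-triplet prefix (objective: simpler).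

-- ===== PORT A =====
def get_greedy_combinations_of_deal (list_of_products : List (Int × Int)) : Int × Int :=
  (PySem.List.pyRange 0 list_of_products.length 3).foldl
    (fun acc i =>
      let product_tuples := PySem.List.slice list_of_products (some i) (some (i + 3))
      if product_tuples.length = 3 then
        (product_tuples.foldl (fun total_cost product_tuple => total_cost + product_tuple.1) acc.1,
         acc.2 + 1)
      else acc)
    (0, 0)

-- ===== PORT B =====
def get_greedy_combinations_of_deal_alt (list_of_products : List (Int × Int)) : Int × Int :=
  let triplets := list_of_products.length / 3
  (((list_of_products.take (3 * triplets)).map Prod.fst).sum, (triplets : Int))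

-- ===== PRECONDITION & SPEC =====
def Spec_get_greedy_combinations_of_deal (list_of_products : List (Int × Int)) (out : Int × Int) : Prop := out = get_greedy_combinations_of_deal_alt list_of_products
instance (list_of_products : List (Int × Int)) (out : Int × Int) : Decidable (Spec_get_greedy_combinations_of_deal list_of_products out) := by unfold Spec_get_greedy_combinations_of_deal; infer_instance

-- ===== CLAIM (what is proved, stated in full; the proofs are below) =====
def Claim_equal_get_greedy_combinations_of_deal : Prop := ∀ (list_of_products : List (Int × Int)), Dom_get_greedy_combinations_of_deal list_of_products → Spec_get_greedy_combinations_of_deal list_of_products (get_greedy_combinations_of_deal list_of_products)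

-- ===== LEMMAS AND PROOFS =====

lemma pvRange3_cons (n : ℕ) :
    PySem.List.pyRange 0 ((n : ℤ) + 3) 3 = 0 :: (PySem.List.pyRange 0 (n : ℤ) 3).map (· + 3) := by
  rw [PySem.List.pyRange_of_pos _ _ (by norm_num : (0:ℤ) < 3),
      PySem.List.pyRange_of_pos _ _ (by norm_num : (0:ℤ) < 3)]
  by_cases h : n = 0
  · subst h; norm_num
  · have h1 : (0:ℤ) < (n:ℤ) + 3 := by positivity
    have h2 : (0:ℤ) < (n:ℤ) := by exact_mod_cast Nat.pos_of_ne_zero h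
    rw [if_pos h1, if_pos h2]
    have hc : (((n:ℤ) + 3 - 0 + 3 - 1) / 3).toNat = (((n:ℤ) - 0 + 3 - 1) / 3).toNat + 1 := by omega
    rw [hc, List.range_succ_eq_map]
    simp only [List.map_cons, List.map_map]
    norm_num
    intro k _
    ring

def pvChunks3 : List (Int × Int) → Int × Int
  | [] => (0, 0)
  | [_] => (0, 0)
  | [_, _] => (0, 0)
  | a :: b :: c :: rest => (a.1 + b.1 + c.1 + (pvChunks3 rest).1, 1 + (pvChunks3 rest).2)

lemma pvSlice_shift (a b c : Int × Int) (rest : List (Int × Int)) (i : Int) (hi : 0 ≤ i) :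
    PySem.List.slice (a :: b :: c :: rest) (some (i + 3)) (some (i + 3 + 3))
      = PySem.List.slice rest (some i) (some (i + 3)) := by
  obtain ⟨j, rfl⟩ := Int.eq_ofNat_of_zero_le hi
  have e1 : ((j:ℤ) + 3) = ((j + 3 : ℕ) : ℤ) := by push_cast; ring
  have e2 : ((j:ℤ) + 3 + 3) = ((j + 6 : ℕ) : ℤ) := by push_cast; ring
  rw [e2, e1, PySem.List.slice_natCast, PySem.List.slice_natCast]
  have hd : List.drop (j + 3) (a :: b :: c :: rest) = List.drop j rest := by
    rw [show j + 3 = j + 1 + 1 + 1 by ring]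
    simp [List.drop_succ_cons]
  rw [hd]
  congr 1
  omega

lemma pvLoop_eq : ∀ (xs : List (Int × Int)) (acc : Int × Int),
    (PySem.List.pyRange 0 xs.length 3).foldl
      (fun acc i =>
        let product_tuples := PySem.List.slice xs (some i) (some (i + 3))
        if product_tuples.length = 3 then
          (product_tuples.foldl (fun total_cost product_tuple => total_cost + product_tuple.1) acc.1,
           acc.2 + 1)
        else acc)
      acc
    = (acc.1 + (pvChunks3 xs).1, acc.2 + (pvChunks3 xs).2) := by
  intro xs
  induction xs using pvChunks3.induct with
  | case1 =>
      intro acc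
      simp [PySem.List.pyRange_of_pos _ _ (by norm_num : (0:ℤ) < 3), pvChunks3]
  | case2 x =>
      intro acc
      rw [PySem.List.pyRange_of_pos _ _ (by norm_num : (0:ℤ) < 3)]
      norm_num [pvChunks3]
      intro h
      rw [PySem.List.slice_to (xs := [x]) (by norm_num : (0:ℤ) ≤ 3)] at h
      simp at h
  | case3 x y =>
      intro acc
      rw [PySem.List.pyRange_of_pos _ _ (by norm_num : (0:ℤ) < 3)]
      norm_num [pvChunks3]
      intro h
      rw [PySem.List.slice_to (xs := [x, y]) (by norm_num : (0:ℤ) ≤ 3)] at h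
      simp at h
  | case4 a b c rest ih =>
      intro acc
      have hlen : (((a :: b :: c :: rest).length : ℕ) : ℤ) = ((rest.length : ℤ) + 3) := by
        push_cast [List.length_cons]; ring
      rw [hlen, pvRange3_cons rest.length, List.foldl_cons, List.foldl_map]
      -- first step: the chunk at index 0 is [a, b, c]
      have h0 : PySem.List.slice (a :: b :: c :: rest) (some 0) (some (0 + 3)) = [a, b, c] := by
        have : ((0:ℤ) + 3) = (((3:ℕ)):ℤ) := by norm_num
        rw [this, show (0:ℤ) = ((0:ℕ):ℤ) from rfl, PySem.List.slice_natCast]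
        rfl
      simp only [h0]
      norm_num
      rw [PySem.List.foldl_congr_mem _ _
        (fun acc i =>
          let product_tuples := PySem.List.slice rest (some i) (some (i + 3))
          if product_tuples.length = 3 then
            (product_tuples.foldl (fun total_cost product_tuple => total_cost + product_tuple.1) acc.1,
             acc.2 + 1)
          else acc) _
        (by
          intro acc2 i hi
          have hnn : 0 ≤ i := ((PySem.List.mem_pyRange_iff_of_pos (by norm_num) i).1 hi).1
          simp only [pvSlice_shift a b c rest i hnn])]
      rw [ih]
      simp only [pvChunks3]
      refine Prod.ext ?_ ?_ <;> simp <;> ring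

lemma pvChunks3_eq_alt : ∀ xs : List (Int × Int),
    pvChunks3 xs = get_greedy_combinations_of_deal_alt xs := by
  intro xs
  induction xs using pvChunks3.induct with
  | case1 => rfl
  | case2 x => simp [pvChunks3, get_greedy_combinations_of_deal_alt]
  | case3 x y => simp [pvChunks3, get_greedy_combinations_of_deal_alt]
  | case4 a b c rest ih =>
      have hq : (rest.length + 1 + 1 + 1) / 3 = rest.length / 3 + 1 := by omega
      have ht : 3 * (rest.length / 3 + 1) = 3 * (rest.length / 3) + 1 + 1 + 1 := by omega
      simp only [pvChunks3, get_greedy_combinations_of_deal_alt, List.length_cons, hq, ht,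
        List.take_succ_cons, List.map_cons, List.sum_cons, ih]
      refine Prod.ext ?_ ?_
      · simp; ring
      · simp; ring

-- ===== VERDICT (by name: the statement is the Claim_ definition above) =====
theorem get_greedy_combinations_of_deal_spec : Claim_equal_get_greedy_combinations_of_deal := by
  intro xs _
  unfold Spec_get_greedy_combinations_of_deal get_greedy_combinations_of_deal
  rw [pvLoop_eq xs (0, 0), ← pvChunks3_eq_alt]
  simp
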